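-- pv_equiv track=rewrite | github.com/DessimozLab/HogProf | src/build/lib/pyoma/browser/models.py | format_sciname
-- ===== SOURCE A (Python) =====
-- def format_sciname(sci, short=False):
--     p = set([sci.find(x) for x in ['(', 'serogroup', 'serotype', 'serovar',
--                                    'biotype', 'subsp', 'pv.', 'bv.']])
--     if sci.startswith('Escherichia coli'):
--         p.add(sci.find('O'))
--     p.discard(-1)
--     p = min(p) if len(p) > 0 else len(sci)
--     return {'species': sci[0:p], 'strain': sci[p:]}
-- ===== SOURCE B (Python) =====
-- def format_sciname(sci, short=False):
--     tokens = ['(', 'serogroup', 'serotype', 'serovar', 'biotype', 'subsp', 'pv.', 'bv.']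
--     if sci.startswith('Escherichia coli'):
--         tokens.append('O')
--     p = len(sci)
--     for i in range(len(sci)):
--         if any(sci.startswith(t, i) for t in tokens):
--             p = i
--             break
--     return {'species': sci[0:p], 'strain': sci[p:]}
-- ===== Notes on version B (the rewrite author's own statement) =====
-- stated objective: alternative
-- what changed: Replaces the eight independent str.find scans collected into a set plus min() with a single left-to-right scan that stops at the first position where any token (plus 'O' for E. coli) matches.
import Mathlib
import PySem

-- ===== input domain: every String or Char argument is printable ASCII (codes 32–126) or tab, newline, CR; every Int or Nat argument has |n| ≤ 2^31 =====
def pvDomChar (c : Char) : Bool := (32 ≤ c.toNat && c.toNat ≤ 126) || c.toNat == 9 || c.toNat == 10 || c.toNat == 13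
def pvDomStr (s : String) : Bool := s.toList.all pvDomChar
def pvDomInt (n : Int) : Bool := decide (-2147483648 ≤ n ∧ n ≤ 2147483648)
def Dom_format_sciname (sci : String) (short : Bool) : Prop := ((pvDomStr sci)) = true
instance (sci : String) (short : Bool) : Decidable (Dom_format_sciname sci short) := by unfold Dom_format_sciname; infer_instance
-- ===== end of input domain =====

-- B replaces A's eight independent find scans + set + min() by one left-to-right scan stopping at the first token match (alternative algorithm, similar cost).


-- ===== PORT A =====
def pvTokensA : List String := ["(", "serogroup", "serotype", "serovar", "biotype", "subsp", "pv.", "bv."]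

def format_sciname (sci : String) (short : Bool) : List (String × String) :=
  let p0 : PySem.Set Int := PySem.Set.ofList (pvTokensA.map (fun x => PySem.Str.find sci x))
  let p1 : PySem.Set Int :=
    if PySem.Str.startswith sci "Escherichia coli" then
      PySem.Set.add p0 (PySem.Str.find sci "O")
    else p0
  let p2 : PySem.Set Int := PySem.Set.discard p1 (-1)
  let p : Int :=
    if PySem.Set.len p2 > 0 then (PySem.List.min? p2 (fun x => x)).getD 0
    else PySem.Str.len sci
  [("species", PySem.Str.slice sci (some 0) (some p)), ("strain", PySem.Str.slice sci (some p) none)]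

-- ===== PORT B =====
def pvTokensB : List (List Char) :=
  ["(".toList, "serogroup".toList, "serotype".toList, "serovar".toList,
   "biotype".toList, "subsp".toList, "pv.".toList, "bv.".toList]

-- 'any(sci.startswith(t, i) for t in tokens)' at the current position
def pvMatchAt (toks : List (List Char)) (s : List Char) : Bool :=
  toks.any (fun t => t.isPrefixOf s)

-- 'for i in range(len(sci)): if match: p = i; break' — first matching index, else the length
def pvScan (toks : List (List Char)) : List Char → Nat → Nat
  | [], k => k
  | c :: rest, k => if pvMatchAt toks (c :: rest) then k else pvScan toks rest (k + 1)

def format_sciname_alt (sci : String) (short : Bool) : List (String × String) :=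
  let toks : List (List Char) :=
    pvTokensB ++ (if PySem.Str.startswith sci "Escherichia coli" then ["O".toList] else [])
  let p : Int := (pvScan toks sci.toList 0 : Nat)
  [("species", PySem.Str.slice sci (some 0) (some p)), ("strain", PySem.Str.slice sci (some p) none)]

-- ===== PRECONDITION & SPEC =====
def Spec_format_sciname (sci : String) (short : Bool) (out : List (String × String)) : Prop := out = format_sciname_alt sci short
instance (sci : String) (short : Bool) (out : List (String × String)) : Decidable (Spec_format_sciname sci short out) := by unfold Spec_format_sciname; infer_instance

-- ===== CLAIM (what is proved, stated in full; the proofs are below) =====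
def Claim_equal_format_sciname : Prop := ∀ (sci : String) (short : Bool), Dom_format_sciname sci short → Spec_format_sciname sci short (format_sciname sci short)

-- ===== LEMMAS AND PROOFS =====

-- no token matches anywhere: the scan runs to the end
lemma pvScan_none (toks : List (List Char)) (cs : List Char)
    (h : ∀ j, ∀ t ∈ toks, ¬ t <+: cs.drop j) :
    ∀ k, pvScan toks cs k = k + cs.length := by
  induction cs with
  | nil => intro k; simp [pvScan]
  | cons c rest ih =>
    intro k
    have h0 : pvMatchAt toks (c :: rest) = false := by
      simp only [pvMatchAt, List.any_eq_false]
      intro t ht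
      simp only [List.isPrefixOf_iff_prefix]
      exact h 0 t ht
    have h' : ∀ j, ∀ t ∈ toks, ¬ t <+: rest.drop j := fun j t ht => h (j + 1) t ht
    simp only [pvScan, h0, Bool.false_eq_true, if_false]
    rw [ih h' (k + 1), List.length_cons]; omega

-- first match at m: the scan returns m
lemma pvScan_first (toks : List (List Char)) (cs : List Char)
    (hne : ∀ t ∈ toks, t ≠ []) :
    ∀ m k, (∃ t ∈ toks, t <+: cs.drop m) → (∀ j < m, ∀ t ∈ toks, ¬ t <+: cs.drop j) →
    pvScan toks cs k = k + m := by
  induction cs with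
  | nil =>
    intro m k hm _
    obtain ⟨t, ht, hp⟩ := hm
    simp only [List.drop_nil] at hp
    exact absurd (List.prefix_nil.mp hp) (hne t ht)
  | cons c rest ih =>
    intro m k hm hmin
    cases m with
    | zero =>
      have h0 : pvMatchAt toks (c :: rest) = true := by
        obtain ⟨t, ht, hp⟩ := hm
        simp only [pvMatchAt, List.any_eq_true]
        exact ⟨t, ht, List.isPrefixOf_iff_prefix.mpr (by simpa using hp)⟩
      simp [pvScan, h0]
    | succ m' =>
      have h0 : pvMatchAt toks (c :: rest) = false := by
        simp only [pvMatchAt, List.any_eq_false]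
        intro t ht
        simp only [List.isPrefixOf_iff_prefix]
        have := hmin 0 (Nat.succ_pos m') t ht
        simpa using this
      have hm' : ∃ t ∈ toks, t <+: rest.drop m' := by simpa using hm
      have hmin' : ∀ j < m', ∀ t ∈ toks, ¬ t <+: rest.drop j := by
        intro j hj t ht
        have := hmin (j + 1) (by omega) t ht
        simpa using this
      simp only [pvScan, h0, Bool.false_eq_true, if_false]
      rw [ih m' (k + 1) hm' hmin']; omega

-- a prefix of a drop is an infix
lemma prefix_drop_infix {t cs : List Char} {j : Nat} (h : t <+: cs.drop j) : t <:+: cs :=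
  h.isInfix.trans (cs.drop_suffix j).isInfix

-- if t matches at position j then find cs t ≤ j
lemma find_le_of_prefix_drop {t cs : List Char} {j : Nat} (h : t <+: cs.drop j) :
    PySem.Chars.find cs t ≤ (j : Int) := by
  have hinf : t <:+: cs := prefix_drop_infix h
  have hnn : 0 ≤ PySem.Chars.find cs t := (PySem.Chars.find_nonneg_iff cs t).mpr hinf
  refine le_of_not_gt (fun hgt => ?_)
  exact (PySem.Chars.find_spec (s := cs) (sub := t) hnn).2 j (by omega) h

-- the bridge: A's set/min computation of p equals B's scan, given the membership description of the set
lemma pvBridge (cs : List Char) (toks : List (List Char)) (S : List Int)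
    (hne : ∀ t ∈ toks, t ≠ [])
    (hmem : ∀ x, x ∈ S ↔ ((∃ t ∈ toks, PySem.Chars.find cs t = x) ∧ x ≠ -1)) :
    (if ((S.length : Int) > 0) then (PySem.List.min? S (fun x => x)).getD 0
     else (cs.length : Int)) = ((pvScan toks cs 0 : Nat) : Int) := by
  rcases hS : S with _ | ⟨x, S'⟩
  · -- empty set: no token occurs anywhere
    have hnomatch : ∀ j, ∀ t ∈ toks, ¬ t <+: cs.drop j := by
      intro j t ht hp
      have hnn : 0 ≤ PySem.Chars.find cs t :=
        (PySem.Chars.find_nonneg_iff cs t).mpr (prefix_drop_infix hp)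
      have : PySem.Chars.find cs t ∈ S :=
        (hmem _).mpr ⟨⟨t, ht, rfl⟩, by omega⟩
      simp [hS] at this
    rw [pvScan_none toks cs hnomatch 0]
    simp
  · -- nonempty: min? returns the least find value, which is the first matching position
    have hSne : S ≠ [] := by simp [hS]
    obtain ⟨m, hmeq⟩ : ∃ m, PySem.List.min? S (fun x => x) = some m := by
      rcases h : PySem.List.min? S (fun x => x) with _ | m
      · exact absurd ((PySem.List.min?_eq_none_iff S _).mp h) hSne
      · exact ⟨m, rfl⟩
    have hmmem := PySem.List.min?_mem hmeq
    have hmmin := PySem.List.min?_isMin hmeq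
    obtain ⟨⟨t0, ht0, hf0⟩, hm1⟩ := (hmem m).mp hmmem
    have hmnn : 0 ≤ m := by
      have := PySem.Chars.neg_one_le_find cs t0
      omega
    have hspec := PySem.Chars.find_spec (s := cs) (sub := t0) (by rw [hf0]; exact hmnn)
    rw [hf0] at hspec
    have hmatch : ∃ t ∈ toks, t <+: cs.drop m.toNat := ⟨t0, ht0, hspec.1⟩
    have hmin' : ∀ j < m.toNat, ∀ t ∈ toks, ¬ t <+: cs.drop j := by
      intro j hj t ht hp
      have hle := find_le_of_prefix_drop hp
      have hnn : 0 ≤ PySem.Chars.find cs t :=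
        (PySem.Chars.find_nonneg_iff cs t).mpr (prefix_drop_infix hp)
      have hmemf : PySem.Chars.find cs t ∈ S := (hmem _).mpr ⟨⟨t, ht, rfl⟩, by omega⟩
      have := hmmin _ hmemf
      simp only at this
      omega
    rw [pvScan_first toks cs hne m.toNat 0 hmatch hmin']
    have hpos : ((x :: S').length : Int) > 0 := by
      simp
    rw [hS] at hmeq
    rw [if_pos hpos, hmeq]
    simp only [Option.getD_some]
    omega

-- String-level wrapper of pvBridge in the exact shape A's port computes p
lemma pvBridgeStr (sci : String) (toks : List (List Char)) (S : List Int)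
    (hne : ∀ t ∈ toks, t ≠ [])
    (hmem : ∀ x, x ∈ S ↔ ((∃ t ∈ toks, PySem.Chars.find sci.toList t = x) ∧ x ≠ -1)) :
    (if PySem.Set.len S > 0 then (PySem.List.min? S (fun x => x)).getD 0
     else PySem.Str.len sci) = ((pvScan toks sci.toList 0 : Nat) : Int) := by
  have h := pvBridge sci.toList toks S hne hmem
  rw [PySem.Str.len_eq]
  exact h

-- ===== VERDICT (by name: the statement is the Claim_ definition above) =====
set_option maxHeartbeats 2000000 in
theorem format_sciname_spec : Claim_equal_format_sciname := by
  intro sci short _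
  unfold Spec_format_sciname format_sciname format_sciname_alt
  cases hE : PySem.Str.startswith sci "Escherichia coli" with
  | false =>
    have hne : ∀ t ∈ pvTokensB, t ≠ [] := by decide
    have hmem : ∀ x : Int,
        x ∈ PySem.Set.discard
              (PySem.Set.ofList (pvTokensA.map (fun x => PySem.Str.find sci x))) (-1) ↔
        ((∃ t ∈ pvTokensB, PySem.Chars.find sci.toList t = x) ∧ x ≠ -1) := by
      intro x
      simp [PySem.Set.mem_discard, PySem.Set.mem_ofList, pvTokensA, pvTokensB]
      tauto
    have key := pvBridgeStr sci pvTokensB _ hne hmem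
    simp only [Bool.false_eq_true, if_false, List.append_nil]
    rw [key]
  | true =>
    have hne : ∀ t ∈ pvTokensB ++ ["O".toList], t ≠ [] := by decide
    have hmem : ∀ x : Int,
        x ∈ PySem.Set.discard
              (PySem.Set.add
                (PySem.Set.ofList (pvTokensA.map (fun x => PySem.Str.find sci x)))
                (PySem.Str.find sci "O")) (-1) ↔
        ((∃ t ∈ pvTokensB ++ ["O".toList], PySem.Chars.find sci.toList t = x) ∧ x ≠ -1) := by
      intro x
      simp [PySem.Set.mem_discard, PySem.Set.mem_add, PySem.Set.mem_ofList,
            pvTokensA, pvTokensB]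
      tauto
    have key := pvBridgeStr sci (pvTokensB ++ ["O".toList]) _ hne hmem
    simp only [if_true]
    rw [key]
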